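-- pv_equiv track=rewrite | github.com/shivalidalmia/MastersDataScience-UST | Python/Python Misc Programs/test_poker_odds2.py | is_hand_sequential
-- ===== SOURCE A (Python) =====
-- def is_hand_sequential(rdict):
--
--     is_sequential = False
--     rdict_ranks_list = list(rdict.keys())
--     rdict_ranks_list.sort()
--
--     # Check if card ranks are consecutive (difference between them is one)
--     for index in range(1, len(rdict_ranks_list)):
--         difference = rdict_ranks_list[index] - rdict_ranks_list[index - 1]
--         if difference == 1:
--             is_sequential = True
--             continue
--         else:
--             is_sequential = False
--             break
--
--     return is_sequential
-- ===== SOURCE B (Python) =====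
-- def is_hand_sequential(rdict):
--     # Closed-form range check: distinct keys are consecutive iff max-min == count-1.
--     ranks = sorted(rdict)
--     return len(ranks) >= 2 and ranks[-1] - ranks[0] == len(ranks) - 1
-- ===== Notes on version B (the rewrite author's own statement) =====
-- stated objective: simpler
-- what changed: Replaces the adjacent-difference scan with break/continue flags by a single closed-form span check (max-min == count-1), valid because dict keys are distinct.
import Mathlib
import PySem

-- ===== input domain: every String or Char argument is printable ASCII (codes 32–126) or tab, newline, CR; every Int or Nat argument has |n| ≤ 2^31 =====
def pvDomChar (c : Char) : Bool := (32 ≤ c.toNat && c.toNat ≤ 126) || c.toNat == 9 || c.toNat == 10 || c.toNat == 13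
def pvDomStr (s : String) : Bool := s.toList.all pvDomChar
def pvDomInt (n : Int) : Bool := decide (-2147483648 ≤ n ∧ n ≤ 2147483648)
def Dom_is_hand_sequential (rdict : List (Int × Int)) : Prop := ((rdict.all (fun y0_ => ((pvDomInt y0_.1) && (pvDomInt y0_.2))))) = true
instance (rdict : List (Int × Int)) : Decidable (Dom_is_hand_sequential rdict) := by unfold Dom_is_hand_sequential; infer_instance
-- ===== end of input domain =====

-- B replaces A's adjacent-difference scan by the closed-form span check max-min = count-1 (simpler; same cost).

-- ===== PORT A =====
-- A's for-loop over index 1..n-1 with continue/break, as structural recursion over the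
-- sorted key list; the accumulator is A's is_sequential flag.
def pvALoop : List Int → Bool → Bool
  | [], acc => acc
  | [_], acc => acc
  | x :: y :: t, _ =>
    if y - x == 1 then pvALoop (y :: t) true else false

def is_hand_sequential (rdict : List (Int × Int)) : Bool :=
  let rdict_ranks_list := PySem.List.sorted (PySem.Dict.ofList rdict).keys (fun x => x) false
  pvALoop rdict_ranks_list false

-- ===== PORT B =====
def is_hand_sequential_alt (rdict : List (Int × Int)) : Bool :=
  let ranks := PySem.List.sorted (PySem.Dict.ofList rdict).keys (fun x => x) false
  decide (2 ≤ ranks.length) && decide (ranks.getLastD 0 - ranks.headD 0 = (ranks.length : Int) - 1)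

-- ===== PRECONDITION & SPEC =====
def Spec_is_hand_sequential (rdict : List (Int × Int)) (out : Bool) : Prop := out = is_hand_sequential_alt rdict
instance (rdict : List (Int × Int)) (out : Bool) : Decidable (Spec_is_hand_sequential rdict out) := by unfold Spec_is_hand_sequential; infer_instance

-- ===== CLAIM (what is proved, stated in full; the proofs are below) =====
def Claim_equal_is_hand_sequential : Prop := ∀ (rdict : List (Int × Int)), Dom_is_hand_sequential rdict → Spec_is_hand_sequential rdict (is_hand_sequential rdict)

-- ===== LEMMAS AND PROOFS =====

-- A strictly increasing nonempty tail gains at least 1 per step.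
theorem pv_span_ge (t : List Int) : ∀ x : Int, (x :: t).Pairwise (· < ·) → t ≠ [] →
    x + t.length ≤ t.getLastD x := by
  induction t with
  | nil => intro x _ h; exact absurd rfl h
  | cons y t' ih =>
    intro x h _
    rcases List.pairwise_cons.mp h with ⟨hx, h'⟩
    have hxy : x < y := hx y (List.mem_cons_self)
    cases t' with
    | nil => simpa using by omega
    | cons z t'' =>
      have := ih y h' (by simp)
      simp only [List.getLastD_cons, List.length_cons] at *
      push_cast at *
      omega

-- Core: on a strictly increasing list with at least two elements, A's scan equals the span check.
theorem pv_loop_span (t : List Int) : ∀ (x y : Int) (b : Bool), (x :: y :: t).Pairwise (· < ·) →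
    pvALoop (x :: y :: t) b =
      decide ((y :: t).getLastD x - x = (t.length : Int) + 1) := by
  induction t with
  | nil =>
    intro x y b _
    by_cases h : y - x = 1 <;> simp [pvALoop, h]
  | cons z t' ih =>
    intro x y b h
    rcases List.pairwise_cons.mp h with ⟨hx, h'⟩
    have hxy : x < y := hx y (List.mem_cons_self)
    rcases List.pairwise_cons.mp h' with ⟨hy, _⟩
    have hyz : y < z := hy z (List.mem_cons_self)
    show (if y - x == 1 then pvALoop (y :: z :: t') true else false) = _
    by_cases hd : y - x = 1
    · rw [if_pos (by simpa using hd), ih y z true h']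
      simp only [List.getLastD_cons, List.length_cons]
      by_cases he : (z :: t').getLastD y - y = (t'.length : Int) + 1
      · have : (z :: t').getLastD y - x = ((t'.length : Int) + 1) + 1 := by omega
        simp only [List.getLastD_cons] at *
        push_cast
        rw [decide_eq_true he, eq_comm, decide_eq_true_iff]
        omega
      · have : ¬ ((z :: t').getLastD y - x = (t'.length : Int) + 1 + 1) := by
          simp only [List.getLastD_cons] at *
          omega
        simp only [List.getLastD_cons] at *
        push_cast
        rw [decide_eq_false he, eq_comm, decide_eq_false_iff_not]
        omega
    · rw [if_neg (by simpa using hd)]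
      have hspan := pv_span_ge (z :: t') y h' (by simp)
      have hx2 : x + 2 ≤ y := by omega
      simp only [List.getLastD_cons, List.length_cons] at *
      rw [eq_comm, decide_eq_false_iff_not]
      push_cast at *
      omega

theorem pv_loop_eq_alt (s : List Int) (h : s.Pairwise (· < ·)) :
    pvALoop s false =
      (decide (2 ≤ s.length) && decide (s.getLastD 0 - s.headD 0 = (s.length : Int) - 1)) := by
  match s with
  | [] => simp [pvALoop]
  | [x] => simp [pvALoop]
  | x :: y :: t =>
    rw [pv_loop_span t x y false h]
    simp only [List.length_cons, List.getLastD_cons, List.headD_cons,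
      show (2 ≤ t.length + 1 + 1) = True from eq_true (by omega), decide_true, Bool.true_and]
    rw [decide_eq_decide]
    push_cast
    omega

theorem pv_sorted_keys_lt (rdict : List (Int × Int)) :
    (PySem.List.sorted (PySem.Dict.ofList rdict).keys (fun x => x) false).Pairwise (· < ·) := by
  have hperm := PySem.List.sorted_perm (PySem.Dict.ofList rdict).keys (fun x : Int => x)
  have hnd : (PySem.List.sorted (PySem.Dict.ofList rdict).keys (fun x : Int => x) false).Nodup :=
    (hperm false).nodup_iff.mpr (PySem.Dict.nodup_keys_ofList rdict)
  have hle := PySem.List.sorted_pairwise (PySem.Dict.ofList rdict).keys (fun x : Int => x)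
  have := List.Pairwise.and hle hnd
  exact this.imp (fun h => lt_of_le_of_ne h.1 h.2)

-- ===== VERDICT (by name: the statement is the Claim_ definition above) =====
theorem is_hand_sequential_spec : Claim_equal_is_hand_sequential := by
  intro rdict _
  unfold Spec_is_hand_sequential is_hand_sequential is_hand_sequential_alt
  exact pv_loop_eq_alt _ (pv_sorted_keys_lt rdict)
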